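-- pv_equiv track=rewrite | github.com/emmaneugene/practice | algos/leetcode/39.py | getNewSums
-- ===== SOURCE A (Python) =====
-- import copy
--
-- def getNewSums(
--     prev: dict[int, list[list[int]]], target: int, c: int
-- ) -> dict[int, list[list[int]]]:
--     newSums: dict[int, list[list[int]]] = {}
--     for val, combis in prev.items():
--         mult = (target - val) // c
--         for m in range(1, mult + 1):
--             newVal = val + c * m
--             newCombis = [copy.deepcopy(combi) + ([c] * m) for combi in combis]
--             if newVal in newSums:
--                 newSums[newVal] += newCombis
--             else:
--                 newSums[newVal] = newCombis
--
--     return newSums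
-- ===== SOURCE B (Python) =====
-- def getNewSums(
--     prev: dict[int, list[list[int]]], target: int, c: int
-- ) -> dict[int, list[list[int]]]:
--     # Stage 1: dynamic programming on the multiplier — each stage's block of
--     # combinations is the previous stage's block with one more c appended,
--     # emitted as a flat (newVal, block) event stream.
--     events = []
--     for val, combis in prev.items():
--         block = combis
--         for m in range(1, (target - val) // c + 1):
--             block = [combo + [c] for combo in block]
--             events.append((val + c * m, block))
--     # Stage 2: one grouping pass over the flat stream.
--     newSums: dict[int, list[list[int]]] = {}
--     for key, block in events:
--         newSums[key] = newSums.get(key, []) + block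
--     return newSums
-- ===== Notes on version B (the rewrite author's own statement) =====
-- stated objective: alternative
-- what changed: B is a two-stage pipeline: stage 1 computes the combination blocks by dynamic programming on the multiplier (each block is the previous block with one c appended, never rebuilding combi+[c]*m from the originals) and emits a flat (newVal, block) event stream; stage 2 is a separate grouping pass that folds the stream into the dict, replacing A's dict update nested inside the double loop.
import Mathlib
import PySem

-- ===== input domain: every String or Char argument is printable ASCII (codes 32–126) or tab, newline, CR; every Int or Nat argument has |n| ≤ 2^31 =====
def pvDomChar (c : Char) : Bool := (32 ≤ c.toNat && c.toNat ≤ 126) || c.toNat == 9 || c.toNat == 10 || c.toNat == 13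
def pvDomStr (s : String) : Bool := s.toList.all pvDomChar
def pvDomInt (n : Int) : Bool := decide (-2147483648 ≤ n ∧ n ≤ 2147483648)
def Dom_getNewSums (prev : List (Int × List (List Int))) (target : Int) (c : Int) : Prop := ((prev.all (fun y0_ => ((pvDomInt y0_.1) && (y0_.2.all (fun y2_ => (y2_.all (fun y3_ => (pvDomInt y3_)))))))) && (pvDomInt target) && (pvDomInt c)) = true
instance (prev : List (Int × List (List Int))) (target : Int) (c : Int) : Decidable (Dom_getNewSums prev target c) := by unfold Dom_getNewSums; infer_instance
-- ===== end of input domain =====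

-- B replaces A's dict update nested inside the double loop by a two-stage pipeline:
-- stage 1 builds each multiplier's combination block by DP from the previous block
-- (one c appended) into a flat (newVal, block) event stream; stage 2 groups the stream.

-- ===== PORT A =====
def getNewSums (prev : List (Int × List (List Int))) (target : Int) (c : Int) : List (Int × List (List Int)) :=
  (prev.foldl
    (fun (newSums : PySem.Dict Int (List (List Int))) (p : Int × List (List Int)) =>
      let val := p.1
      let combis := p.2
      let mult := PySem.Int.floordiv (target - val) c
      (PySem.List.pyRange 1 (mult + 1)).foldl
        (fun newSums m =>
          let newVal := val + c * m
          let newCombis := combis.map (fun combi => combi ++ List.replicate m.toNat c)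
          if newSums.contains newVal then
            newSums.modify newVal [] (· ++ newCombis)
          else
            newSums.insert newVal newCombis)
        newSums)
    PySem.Dict.empty).items

-- ===== PORT B =====
def getNewSums_alt (prev : List (Int × List (List Int))) (target : Int) (c : Int) : List (Int × List (List Int)) :=
  -- stage 1: flat event stream, blocks grown by DP on the multiplier
  let events := prev.foldl
    (fun (events : List (Int × List (List Int))) (p : Int × List (List Int)) =>
      let val := p.1
      ((PySem.List.pyRange 1 (PySem.Int.floordiv (target - val) c + 1)).foldl
        (fun (st : List (List Int) × List (Int × List (List Int))) m =>
          let block := st.1.map (fun combo => combo ++ [c])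
          (block, st.2 ++ [(val + c * m, block)]))
        (p.2, events)).2)
    []
  -- stage 2: grouping pass
  (events.foldl
    (fun (newSums : PySem.Dict Int (List (List Int))) (kb : Int × List (List Int)) =>
      newSums.insert kb.1 (newSums.getD kb.1 [] ++ kb.2))
    PySem.Dict.empty).items

-- ===== PRECONDITION & SPEC =====
-- Pre_ excludes only c = 0 with nonempty prev: there Python A (and B) raises ZeroDivisionError.
def Pre_getNewSums (prev : List (Int × List (List Int))) (target : Int) (c : Int) : Prop :=
  prev = [] ∨ c ≠ 0
instance (prev : List (Int × List (List Int))) (target : Int) (c : Int) : Decidable (Pre_getNewSums prev target c) := by unfold Pre_getNewSums; infer_instance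

def pvWitness_getNewSums : (List (Int × List (List Int))) × Int × Int := ([(0, [[2]])], 4, 2)

def Spec_getNewSums (prev : List (Int × List (List Int))) (target : Int) (c : Int) (out : List (Int × List (List Int))) : Prop := out = getNewSums_alt prev target c
instance (prev : List (Int × List (List Int))) (target : Int) (c : Int) (out : List (Int × List (List Int))) : Decidable (Spec_getNewSums prev target c out) := by unfold Spec_getNewSums; infer_instance

-- ===== CLAIM (what is proved, stated in full; the proofs are below) =====
def Claim_equal_getNewSums : Prop := ∀ (prev : List (Int × List (List Int))) (target : Int) (c : Int), Dom_getNewSums prev target c → Pre_getNewSums prev target c → Spec_getNewSums prev target c (getNewSums prev target c)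

-- ===== LEMMAS AND PROOFS =====

-- the per-entry event stream both programs realise
def pvEv (target c : Int) (p : Int × List (List Int)) : List (Int × List (List Int)) :=
  (PySem.List.pyRange 1 (PySem.Int.floordiv (target - p.1) c + 1)).map
    (fun m => (p.1 + c * m, p.2.map (fun combi => combi ++ List.replicate m.toNat c)))

-- the grouping fold (B's stage 2)
def pvF (d : PySem.Dict Int (List (List Int))) (evs : List (Int × List (List Int))) :
    PySem.Dict Int (List (List Int)) :=
  evs.foldl (fun d kb => d.insert kb.1 (d.getD kb.1 [] ++ kb.2)) d

-- A's per-entry inner loop is the grouping fold of that entry's event stream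
lemma stepA_eq_F (target c : Int) (p : Int × List (List Int))
    (d : PySem.Dict Int (List (List Int))) :
    (PySem.List.pyRange 1 (PySem.Int.floordiv (target - p.1) c + 1)).foldl
      (fun newSums m =>
        if newSums.contains (p.1 + c * m) then
          newSums.modify (p.1 + c * m) []
            (· ++ p.2.map (fun combi => combi ++ List.replicate m.toNat c))
        else
          newSums.insert (p.1 + c * m) (p.2.map (fun combi => combi ++ List.replicate m.toNat c)))
      d
    = pvF d (pvEv target c p) := by
  unfold pvF pvEv
  rw [List.foldl_map]
  apply PySem.List.foldl_congr_mem
  intro acc m _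
  by_cases h : acc.contains (p.1 + c * m)
  · simp [h, PySem.Dict.modify]
  · simp only [Bool.not_eq_true] at h
    simp [h, PySem.Dict.getD_of_not_contains acc _ h]

-- B's inner loop: the DP-grown blocks emitted are exactly combi ++ [c]*m, appended flat
lemma evB (c val : Int) : ∀ (n : Nat) (a : Int) (bl : List (List Int))
    (acc : List (Int × List (List Int))),
    ((PySem.List.pyRange a (a + (n : Int))).foldl
      (fun (st : List (List Int) × List (Int × List (List Int))) m =>
        (st.1.map (fun combo => combo ++ [c]),
          st.2 ++ [(val + c * m, st.1.map (fun combo => combo ++ [c]))]))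
      (bl, acc)).2
    = acc ++ (PySem.List.pyRange a (a + (n : Int))).map
        (fun m => (val + c * m, bl.map (fun combi => combi ++ List.replicate (m - a + 1).toNat c))) := by
  intro n
  induction n with
  | zero =>
    intro a bl acc
    rw [show (a : Int) + (0 : Nat) = a by simp, PySem.List.pyRange_one_eq_nil (by omega)]
    simp
  | succ n ih =>
    intro a bl acc
    have hb : (a : Int) + ((n + 1 : Nat) : Int) = (a + 1) + (n : Nat) := by push_cast; ring
    rw [hb, PySem.List.pyRange_one_cons (by omega), List.foldl_cons, List.map_cons]
    rw [ih (a + 1) (bl.map (fun combo => combo ++ [c]))]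
    have hhead : bl.map (fun combi => combi ++ List.replicate (a - a + 1).toNat c)
        = bl.map (fun combo => combo ++ [c]) := by
      simp
    rw [hhead, List.append_assoc]
    congr 1
    simp only [List.singleton_append]
    congr 1
    apply List.map_congr_left
    intro m hm
    rw [PySem.List.mem_pyRange_one] at hm
    have ht : (m - a + 1).toNat = (m - (a + 1) + 1).toNat + 1 := by omega
    rw [List.map_map, ht]
    congr 1
    apply List.map_congr_left
    intro x _
    simp [Function.comp, List.replicate_succ]

-- B's per-entry pass appends exactly the entry's event stream
lemma stepB_eq_append (target c : Int) (p : Int × List (List Int))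
    (events : List (Int × List (List Int))) :
    ((PySem.List.pyRange 1 (PySem.Int.floordiv (target - p.1) c + 1)).foldl
      (fun (st : List (List Int) × List (Int × List (List Int))) m =>
        (st.1.map (fun combo => combo ++ [c]),
          st.2 ++ [(p.1 + c * m, st.1.map (fun combo => combo ++ [c]))]))
      (p.2, events)).2
    = events ++ pvEv target c p := by
  unfold pvEv
  set mult := PySem.Int.floordiv (target - p.1) c with hm
  by_cases h : 0 ≤ mult
  · have hb : mult + 1 = (1 : Int) + ((mult.toNat : Nat) : Int) := by omega
    rw [hb, evB c p.1 mult.toNat 1 p.2 events]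
    congr 1
    apply List.map_congr_left
    intro m _
    simp [show m - 1 + 1 = m by ring]
  · rw [PySem.List.pyRange_one_eq_nil (by omega)]
    simp

-- grouping a flatly-built stream = running the grouping fold entry by entry
lemma F_flatten (evs : (Int × List (List Int)) → List (Int × List (List Int))) :
    ∀ (l : List (Int × List (List Int))) (acc : List (Int × List (List Int)))
      (d : PySem.Dict Int (List (List Int))),
      pvF d (l.foldl (fun acc p => acc ++ evs p) acc)
        = l.foldl (fun d p => pvF d (evs p)) (pvF d acc) := by
  intro l
  induction l with
  | nil => intro acc d; rfl
  | cons x l ih =>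
    intro acc d
    simp only [List.foldl_cons]
    rw [ih (acc ++ evs x) d]
    congr 1
    unfold pvF
    rw [List.foldl_append]

-- ===== VERDICT (by name: the statement is the Claim_ definition above) =====
theorem getNewSums_spec : Claim_equal_getNewSums := by
  intro prev target c _ _
  unfold Spec_getNewSums getNewSums getNewSums_alt
  have hA : prev.foldl
      (fun (newSums : PySem.Dict Int (List (List Int))) (p : Int × List (List Int)) =>
        (PySem.List.pyRange 1 (PySem.Int.floordiv (target - p.1) c + 1)).foldl
          (fun newSums m =>
            if newSums.contains (p.1 + c * m) then
              newSums.modify (p.1 + c * m) []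
                (· ++ p.2.map (fun combi => combi ++ List.replicate m.toNat c))
            else
              newSums.insert (p.1 + c * m)
                (p.2.map (fun combi => combi ++ List.replicate m.toNat c)))
          newSums)
      PySem.Dict.empty
    = prev.foldl (fun d p => pvF d (pvEv target c p)) PySem.Dict.empty := by
    apply PySem.List.foldl_congr_mem
    intro d p _
    exact stepA_eq_F target c p d
  have hEvents : prev.foldl
      (fun (events : List (Int × List (List Int))) (p : Int × List (List Int)) =>
        ((PySem.List.pyRange 1 (PySem.Int.floordiv (target - p.1) c + 1)).foldl
          (fun (st : List (List Int) × List (Int × List (List Int))) m =>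
            (st.1.map (fun combo => combo ++ [c]),
              st.2 ++ [(p.1 + c * m, st.1.map (fun combo => combo ++ [c]))]))
          (p.2, events)).2)
      []
    = prev.foldl (fun acc p => acc ++ pvEv target c p) [] := by
    apply PySem.List.foldl_congr_mem
    intro events p _
    exact stepB_eq_append target c p events
  rw [hA, hEvents]
  have := F_flatten (pvEv target c) prev [] PySem.Dict.empty
  exact congrArg PySem.Dict.items this.symm
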